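-- pv_equiv track=rewrite | github.com/MarcusLoureiro/Jupyter | Exemplos Memória Cache/Exemplo 5.2.py | CalculaBase
-- ===== SOURCE A (Python) =====
-- def CalculaBase(b):
--     valor = ""
--     resultado = 1
--     for i in range(len(b)):
--         if(b[i] == "B"):
--             break
--         elif(b[i] == "K"):
--             resultado = 2**10
--             break
--         elif(b[i] == "M"):
--             resultado = 2**20
--             break
--         elif(b[i] == "G"):
--             resultado = 2**30
--             break
--         else: valor = valor + b[i]
--
--     return (int(valor))*resultado
-- ===== SOURCE B (Python) =====
-- def CalculaBase(b):
--     mult = {'B': 1, 'K': 2**10, 'M': 2**20, 'G': 2**30}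
--     idx, unit = len(b), None
--     for c in mult:
--         j = b.find(c)
--         if j != -1 and j < idx:
--             idx, unit = j, c
--     return int(b[:idx]) * (mult[unit] if unit is not None else 1)
-- ===== Notes on version B (the rewrite author's own statement) =====
-- stated objective: alternative
-- what changed: B replaces A's left-to-right character-accumulation loop by locating the split point as the minimum of the per-suffix str.find positions over a multiplier dict and slicing the numeric prefix once.
import Mathlib
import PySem

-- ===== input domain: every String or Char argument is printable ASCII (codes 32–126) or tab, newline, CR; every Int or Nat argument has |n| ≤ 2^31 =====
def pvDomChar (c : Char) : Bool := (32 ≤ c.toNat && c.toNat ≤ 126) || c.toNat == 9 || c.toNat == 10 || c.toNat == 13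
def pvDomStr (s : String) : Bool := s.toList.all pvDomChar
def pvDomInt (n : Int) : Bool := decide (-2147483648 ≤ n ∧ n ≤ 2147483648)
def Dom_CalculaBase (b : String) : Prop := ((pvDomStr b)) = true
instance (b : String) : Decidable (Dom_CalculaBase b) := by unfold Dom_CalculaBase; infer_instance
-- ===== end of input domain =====

-- B locates the numeric/suffix split as the minimum of per-suffix find positions instead of A's
-- character-accumulation scan; same values, same cost (objective: alternative).

-- ===== PORT A =====
-- A's for-loop with break: state (valor, resultado); each branch in Python's order.
def CalculaBaseLoop : List Char → List Char → (List Char × Int)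
  | [], valor => (valor, 1)
  | c :: rest, valor =>
    if c = 'B' then (valor, 1)
    else if c = 'K' then (valor, 2 ^ 10)
    else if c = 'M' then (valor, 2 ^ 20)
    else if c = 'G' then (valor, 2 ^ 30)
    else CalculaBaseLoop rest (valor ++ [c])

-- int(valor) raises ValueError when the prefix does not parse; Pre_ excludes exactly those inputs.
def CalculaBase (b : String) : Int :=
  let vr := CalculaBaseLoop b.toList []
  (PySem.Int.ofChars? vr.1).getD 0 * vr.2

-- ===== PORT B =====
def altMult : PySem.Dict Char Int :=
  PySem.Dict.ofList [('B', 1), ('K', 2 ^ 10), ('M', 2 ^ 20), ('G', 2 ^ 30)]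

def CalculaBase_alt (b : String) : Int :=
  let cs := b.toList
  let p := altMult.keys.foldl
    (fun (p : Nat × Option Char) c =>
      let j := PySem.Chars.find cs [c]
      if j ≠ -1 ∧ j < (p.1 : Int) then (j.toNat, some c) else p)
    (cs.length, none)
  (PySem.Int.ofChars? (cs.take p.1)).getD 0 *
    (match p.2 with
     | some c => altMult.getD c 1
     | none => 1)

-- ===== PRECONDITION & SPEC =====
-- Pre_ excludes exactly the inputs where int() raises ValueError in both programs:
-- the prefix before the first unit letter must parse as a Python int.
def Pre_CalculaBase (b : String) : Prop :=
  (PySem.Int.ofChars? (b.toList.takeWhile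
    (fun c => !(c == 'B' || c == 'K' || c == 'M' || c == 'G')))).isSome = true
instance (b : String) : Decidable (Pre_CalculaBase b) := by unfold Pre_CalculaBase; infer_instance

def pvWitness_CalculaBase : String := "512K"

def Spec_CalculaBase (b : String) (out : Int) : Prop := out = CalculaBase_alt b
instance (b : String) (out : Int) : Decidable (Spec_CalculaBase b out) := by unfold Spec_CalculaBase; infer_instance

-- ===== CLAIM (what is proved, stated in full; the proofs are below) =====
def Claim_equal_CalculaBase : Prop :=
  ∀ (b : String), Dom_CalculaBase b → Pre_CalculaBase b → Spec_CalculaBase b (CalculaBase b)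

-- ===== LEMMAS AND PROOFS =====

-- One step of B's minimisation fold, and the fold itself (proof-side mirror of B's loop).
def bstep (cs : List Char) (p : Nat × Option Char) (c : Char) : Nat × Option Char :=
  if PySem.Chars.find cs [c] ≠ -1 ∧ PySem.Chars.find cs [c] < (p.1 : Int) then
    ((PySem.Chars.find cs [c]).toNat, some c)
  else p

def bsel (cs : List Char) : Nat × Option Char :=
  ['B', 'K', 'M', 'G'].foldl (bstep cs) (cs.length, none)

def bmult (o : Option Char) : Int :=
  match o with
  | some c => altMult.getD c 1
  | none => 1

theorem alt_eq (b : String) :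
    CalculaBase_alt b =
      (PySem.Int.ofChars? (b.toList.take (bsel b.toList).1)).getD 0 * bmult (bsel b.toList).2 := rfl

theorem go_main (c : Char) (cs : List Char) : ∀ k : Nat,
    (PySem.Chars.find.go [c] cs k = -1 ∧ PySem.Chars.find.go [c] cs 0 = -1) ∨
    ∃ n : Nat, PySem.Chars.find.go [c] cs 0 = n ∧ PySem.Chars.find.go [c] cs k = n + k := by
  induction cs with
  | nil => intro k; left; constructor <;> simp [PySem.Chars.find.go, List.isEmpty]
  | cons x t ih =>
    intro k
    simp only [PySem.Chars.find.go]
    by_cases h : [c].isPrefixOf (x :: t) = true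
    · right; exact ⟨0, by simp [h]⟩
    · simp only [h, Bool.false_eq_true, if_false]
      rcases ih (k + 1) with ⟨h1, h0⟩ | ⟨n, hn0, hnk⟩
      · left
        rcases ih 1 with ⟨h2, _⟩ | ⟨n, hn0, hn1⟩
        · exact ⟨h1, h2⟩
        · rw [hn0] at h0; omega
      · right
        rcases ih 1 with ⟨_, h2⟩ | ⟨m, hm0, hm1⟩
        · rw [hn0] at h2; omega
        · refine ⟨n + 1, ?_, ?_⟩
          · rw [hm1]; rw [hm0] at hn0; push_cast at *; omega
          · rw [hnk]; push_cast; ring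

theorem find_cons (x c : Char) (cs : List Char) :
    PySem.Chars.find (x :: cs) [c] =
      if c = x then 0
      else if PySem.Chars.find cs [c] = -1 then -1 else PySem.Chars.find cs [c] + 1 := by
  show PySem.Chars.find.go [c] (x :: cs) 0 = _
  simp only [PySem.Chars.find.go, List.isPrefixOf, Bool.and_true]
  by_cases h : c = x
  · simp [h]
  · have hb : (c == x) = false := by simp [h]
    simp only [hb, Bool.false_eq_true, if_false, if_neg h]
    rcases go_main c cs 1 with ⟨h1, h0⟩ | ⟨n, hn0, hn1⟩
    · show PySem.Chars.find.go [c] cs 1 = _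
      rw [h1]
      show (-1 : Int) = if PySem.Chars.find.go [c] cs 0 = -1 then -1 else _
      rw [if_pos h0]
    · show PySem.Chars.find.go [c] cs 1 = _
      rw [hn1]
      show ((n : Int) + 1) = if PySem.Chars.find.go [c] cs 0 = -1 then -1 else PySem.Chars.find.go [c] cs 0 + 1
      rw [hn0]
      rw [if_neg (by omega)]

theorem find_ge (c : Char) (cs : List Char) : -1 ≤ PySem.Chars.find cs [c] := by
  rcases go_main c cs 0 with ⟨_, h0⟩ | ⟨n, hn0, _⟩
  · show -1 ≤ PySem.Chars.find.go [c] cs 0; omega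
  · show -1 ≤ PySem.Chars.find.go [c] cs 0; omega

theorem find_self_zero (x : Char) (cs : List Char) :
    PySem.Chars.find (x :: cs) [x] = 0 := by
  rw [find_cons]; simp

theorem bstep_zero (cs : List Char) (o : Option Char) (c : Char) :
    bstep cs (0, o) c = (0, o) := by
  unfold bstep
  have := find_ge c cs
  rw [if_neg (by simp only []; omega)]

theorem bstep_found_zero (cs : List Char) (p : Nat × Option Char) (c : Char)
    (h : PySem.Chars.find cs [c] = 0) (hp : 1 ≤ p.1) : bstep cs p c = (0, some c) := by
  unfold bstep
  rw [h, if_pos (by constructor <;> omega)]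
  rfl

theorem bstep_fst_pos (x c : Char) (cs : List Char) (p : Nat × Option Char)
    (hx : c ≠ x) (hp : 1 ≤ p.1) : 1 ≤ (bstep (x :: cs) p c).1 := by
  unfold bstep
  have hf := find_ge c cs
  rw [find_cons, if_neg hx]
  by_cases h : PySem.Chars.find cs [c] = -1
  · simp [h, hp]
  · rw [if_neg h]
    split_ifs with h2
    · simp only []
      omega
    · exact hp

theorem bstep_shift (x c : Char) (cs : List Char) (p : Nat × Option Char) (hx : c ≠ x) :
    bstep (x :: cs) (p.1 + 1, p.2) c = ((bstep cs p c).1 + 1, (bstep cs p c).2) := by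
  unfold bstep
  have hf := find_ge c cs
  rw [find_cons, if_neg hx]
  by_cases h : PySem.Chars.find cs [c] = -1
  · rw [h, if_neg (by simp), if_neg (by simp)]
  · rw [if_neg h]
    by_cases h2 : PySem.Chars.find cs [c] ≠ -1 ∧ PySem.Chars.find cs [c] < (p.1 : Int)
    · rw [if_pos (by constructor <;> [omega; (push_cast; omega)]), if_pos h2]
      have : (PySem.Chars.find cs [c] + 1).toNat = (PySem.Chars.find cs [c]).toNat + 1 := by omega
      simp [this]
    · rw [if_neg (by intro ⟨a, b⟩; push_cast at b; exact h2 ⟨h, by omega⟩), if_neg h2]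

theorem bsel_shift (x : Char) (cs : List Char)
    (hB : x ≠ 'B') (hK : x ≠ 'K') (hM : x ≠ 'M') (hG : x ≠ 'G') :
    bsel (x :: cs) = ((bsel cs).1 + 1, (bsel cs).2) := by
  unfold bsel
  simp only [List.foldl, List.length_cons]
  rw [show ((cs.length + 1 : Nat), (none : Option Char)) = (((cs.length, (none : Option Char)).1 + 1), (cs.length, (none : Option Char)).2) from rfl]
  rw [bstep_shift x 'B' cs _ (fun h => hB h.symm)]
  rw [bstep_shift x 'K' cs _ (fun h => hK h.symm)]
  rw [bstep_shift x 'M' cs _ (fun h => hM h.symm)]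
  rw [bstep_shift x 'G' cs _ (fun h => hG h.symm)]

theorem loop_eq (cs : List Char) : ∀ valor : List Char,
    CalculaBaseLoop cs valor = (valor ++ cs.take (bsel cs).1, bmult (bsel cs).2) := by
  induction cs with
  | nil =>
    intro valor
    have h : bsel [] = (0, none) := by decide
    simp [CalculaBaseLoop, h, bmult]
  | cons x cs ih =>
    intro valor
    by_cases hB : x = 'B'
    · subst hB
      have hs : bsel ('B' :: cs) = (0, some 'B') := by
        unfold bsel
        simp only [List.foldl, List.length_cons]
        rw [bstep_found_zero _ _ _ (find_self_zero 'B' cs) (by omega)]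
        rw [bstep_zero, bstep_zero, bstep_zero]
      rw [hs]
      simp [CalculaBaseLoop, bmult]
      decide
    · by_cases hK : x = 'K'
      · subst hK
        have h1 : 1 ≤ (bstep ('K' :: cs) (cs.length + 1, (none : Option Char)) 'B').1 :=
          bstep_fst_pos 'K' 'B' cs _ (by decide) (by omega)
        have hs : bsel ('K' :: cs) = (0, some 'K') := by
          unfold bsel
          simp only [List.foldl, List.length_cons]
          rw [bstep_found_zero _ _ _ (find_self_zero 'K' cs) h1]
          rw [bstep_zero, bstep_zero]
        rw [hs]
        simp [CalculaBaseLoop, bmult]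
        decide
      · by_cases hM : x = 'M'
        · subst hM
          have h1 : 1 ≤ (bstep ('M' :: cs) (cs.length + 1, (none : Option Char)) 'B').1 :=
            bstep_fst_pos 'M' 'B' cs _ (by decide) (by omega)
          have h2 : 1 ≤ (bstep ('M' :: cs) (bstep ('M' :: cs) (cs.length + 1, none) 'B') 'K').1 :=
            bstep_fst_pos 'M' 'K' cs _ (by decide) h1
          have hs : bsel ('M' :: cs) = (0, some 'M') := by
            unfold bsel
            simp only [List.foldl, List.length_cons]
            rw [bstep_found_zero _ _ _ (find_self_zero 'M' cs) h2]
            rw [bstep_zero]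
          rw [hs]
          simp [CalculaBaseLoop, bmult]
          decide
        · by_cases hG : x = 'G'
          · subst hG
            have h1 : 1 ≤ (bstep ('G' :: cs) (cs.length + 1, (none : Option Char)) 'B').1 :=
              bstep_fst_pos 'G' 'B' cs _ (by decide) (by omega)
            have h2 : 1 ≤ (bstep ('G' :: cs) (bstep ('G' :: cs) (cs.length + 1, none) 'B') 'K').1 :=
              bstep_fst_pos 'G' 'K' cs _ (by decide) h1
            have h3 : 1 ≤ (bstep ('G' :: cs) (bstep ('G' :: cs) (bstep ('G' :: cs) (cs.length + 1, none) 'B') 'K') 'M').1 :=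
              bstep_fst_pos 'G' 'M' cs _ (by decide) h2
            have hs : bsel ('G' :: cs) = (0, some 'G') := by
              unfold bsel
              simp only [List.foldl, List.length_cons]
              rw [bstep_found_zero _ _ _ (find_self_zero 'G' cs) h3]
            rw [hs]
            simp [CalculaBaseLoop, bmult]
            decide
          · have hs := bsel_shift x cs hB hK hM hG
            rw [hs]
            simp only [CalculaBaseLoop, if_neg hB, if_neg hK, if_neg hM, if_neg hG]
            rw [ih (valor ++ [x])]
            simp

-- ===== VERDICT (by name: the statement is the Claim_ definition above) =====
theorem CalculaBase_spec : Claim_equal_CalculaBase := by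
  intro b _ _
  unfold Spec_CalculaBase
  rw [alt_eq]
  show (PySem.Int.ofChars? (CalculaBaseLoop b.toList []).1).getD 0 * (CalculaBaseLoop b.toList []).2 = _
  rw [loop_eq b.toList []]
  simp
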